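-- pv_equiv track=rewrite | github.com/coolgenerator/ScholarPath | scholarpath/scripts/causal_staged_train.py | _has_two_consecutive_stage4_passes
-- ===== SOURCE A (Python) =====
-- def _has_two_consecutive_stage4_passes(history_rows: list[dict[str, str]]) -> bool:
--     stage4 = [row for row in history_rows if str(row.get("stage")) == "4"]
--     if len(stage4) < 2:
--         return False
--     return (
--         str(stage4[-1].get("passed", "")).strip().lower() == "true"
--         and str(stage4[-2].get("passed", "")).strip().lower() == "true"
--     )
-- ===== SOURCE B (Python) =====
-- def _has_two_consecutive_stage4_passes(history_rows: list[dict[str, str]]) -> bool: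
--     buf = []
--     for row in reversed(history_rows):
--         if str(row.get("stage")) == "4":
--             buf.append(row)
--             if len(buf) == 2:
--                 break
--     if len(buf) < 2:
--         return False
--     return all(str(r.get("passed", "")).strip().lower() == "true" for r in buf)
-- ===== Notes on version B (the rewrite author's own statement) =====
-- stated objective: simpler
-- what changed: Back-to-front scan with early termination: B walks history_rows in reverse, collects at most the two most recent stage-4 rows and stops, instead of materialising the full filtered stage-4 list and indexing it from the end.
import Mathlib
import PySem

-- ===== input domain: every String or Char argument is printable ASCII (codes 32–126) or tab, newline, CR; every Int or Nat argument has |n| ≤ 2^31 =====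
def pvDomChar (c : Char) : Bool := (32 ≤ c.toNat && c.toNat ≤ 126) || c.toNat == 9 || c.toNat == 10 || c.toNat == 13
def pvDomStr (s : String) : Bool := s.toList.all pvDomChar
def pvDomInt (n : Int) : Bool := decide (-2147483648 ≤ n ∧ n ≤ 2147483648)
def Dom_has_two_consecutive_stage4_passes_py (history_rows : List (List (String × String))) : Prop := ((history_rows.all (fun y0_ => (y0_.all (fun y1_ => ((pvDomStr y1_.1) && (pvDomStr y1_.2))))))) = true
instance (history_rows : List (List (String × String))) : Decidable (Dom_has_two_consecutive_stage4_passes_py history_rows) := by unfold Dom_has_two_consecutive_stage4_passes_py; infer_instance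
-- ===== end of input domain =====

-- B replaces A's full filter-then-index-from-the-end with a reverse scan that stops after
-- collecting the two most recent stage-4 rows (objective: simpler / early-terminating).

-- ===== PORT A =====
-- row.get("stage") → Option; str(None) = "None"
def pvAStage4 (row : List (String × String)) : Bool :=
  (match (PySem.Dict.mk row).get? "stage" with
   | some v => v
   | none => "None") == "4"

-- str(row.get("passed", "")).strip().lower() == "true"
def pvAPassed (row : List (String × String)) : Bool :=
  PySem.Str.lower (PySem.Str.strip ((PySem.Dict.mk row).getD "passed" "")) == "true"

def has_two_consecutive_stage4_passes_py (history_rows : List (List (String × String))) : Bool :=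
  let stage4 := history_rows.filter pvAStage4
  if stage4.length < 2 then false
  else
    match PySem.List.pyGet? stage4 (-1), PySem.List.pyGet? stage4 (-2) with
    | some a, some b => pvAPassed a && pvAPassed b
    | _, _ => false   -- unreachable: length ≥ 2 guards both negative indexings

-- ===== PORT B =====
def pvBStage4 (row : List (String × String)) : Bool :=
  (match (PySem.Dict.mk row).get? "stage" with
   | some v => v
   | none => "None") == "4"

def pvBPassed (row : List (String × String)) : Bool :=
  PySem.Str.lower (PySem.Str.strip ((PySem.Dict.mk row).getD "passed" "")) == "true"

-- the reverse loop with the two-element buffer: acc = the stage-4 rows seen so far (at most one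
-- before we break); breaking with a full buffer returns the conjunction over the buffer
def pvBLoop : List (List (String × String)) → Option (List (String × String)) → Bool
  | [], _ => false
  | row :: rest, acc =>
    if pvBStage4 row then
      match acc with
      | none => pvBLoop rest (some row)
      | some r0 => pvBPassed r0 && pvBPassed row
    else pvBLoop rest acc

def has_two_consecutive_stage4_passes_py_alt (history_rows : List (List (String × String))) : Bool :=
  pvBLoop history_rows.reverse none

-- ===== PRECONDITION & SPEC =====
def Spec_has_two_consecutive_stage4_passes_py (history_rows : List (List (String × String))) (out : Bool) : Prop := out = has_two_consecutive_stage4_passes_py_alt history_rows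
instance (history_rows : List (List (String × String))) (out : Bool) : Decidable (Spec_has_two_consecutive_stage4_passes_py history_rows out) := by unfold Spec_has_two_consecutive_stage4_passes_py; infer_instance

-- ===== CLAIM (what is proved, stated in full; the proofs are below) =====
def Claim_equal_has_two_consecutive_stage4_passes_py : Prop := ∀ (history_rows : List (List (String × String))), Dom_has_two_consecutive_stage4_passes_py history_rows → Spec_has_two_consecutive_stage4_passes_py history_rows (has_two_consecutive_stage4_passes_py history_rows)

-- ===== LEMMAS AND PROOFS =====

theorem pvB_eq_pvA_stage4 : pvBStage4 = pvAStage4 := rfl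
theorem pvB_eq_pvA_passed : pvBPassed = pvAPassed := rfl

-- the loop with an empty buffer computes the conjunction over the first two stage-4 rows of its input
theorem pvBLoop_some (l : List (List (String × String))) (r0 : List (String × String)) :
    pvBLoop l (some r0) =
      match l.filter pvBStage4 with
      | a :: _ => pvBPassed r0 && pvBPassed a
      | [] => false := by
  induction l with
  | nil => rfl
  | cons x xs ih =>
    by_cases h : pvBStage4 x = true <;> simp [pvBLoop, h, ih]

theorem pvBLoop_none (l : List (List (String × String))) :
    pvBLoop l none =
      match l.filter pvBStage4 with
      | a :: b :: _ => pvBPassed a && pvBPassed b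
      | _ => false := by
  induction l with
  | nil => rfl
  | cons x xs ih =>
    by_cases h : pvBStage4 x = true
    · simp only [pvBLoop, h, if_pos, List.filter_cons_of_pos h, pvBLoop_some]
      cases xs.filter pvBStage4 <;> rfl
    · simp [pvBLoop, h, ih]

theorem has_two_consecutive_stage4_passes_py_spec' (history_rows : List (List (String × String))) :
    has_two_consecutive_stage4_passes_py history_rows =
      has_two_consecutive_stage4_passes_py_alt history_rows := by
  unfold has_two_consecutive_stage4_passes_py has_two_consecutive_stage4_passes_py_alt
  rw [pvBLoop_none, List.filter_reverse, pvB_eq_pvA_stage4]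
  set F := history_rows.filter pvAStage4 with hF
  rcases hR : F.reverse with _ | ⟨a, tl⟩
  · have : F = [] := by simpa using congrArg List.reverse hR
    simp [this]
  · rcases tl with _ | ⟨b, tl'⟩
    · have : F = [a] := by simpa using congrArg List.reverse hR
      simp [this]
    · -- F.reverse = a :: b :: tl', so F = tl'.reverse ++ [b, a], length ≥ 2
      have hFval : F = tl'.reverse ++ [b, a] := by
        have := congrArg List.reverse hR
        simpa using this
      have h1 : PySem.List.pyGet? F (-1) = some a := by
        rw [hFval]
        have : tl'.reverse ++ [b, a] = (tl'.reverse ++ [b]) ++ [a] := by simp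
        rw [this, PySem.List.pyGet?_neg_one_append_singleton]
      have h2 : PySem.List.pyGet? F (-2) = some b := by
        rw [hFval]
        rw [PySem.List.pyGet?_neg_ofNat _ 2 (by omega) (by simp)]
        simp
      have hlen : ¬ F.length < 2 := by rw [hFval]; simp
      simp [hlen, h1, h2, pvB_eq_pvA_passed]

-- ===== VERDICT (by name: the statement is the Claim_ definition above) =====
theorem has_two_consecutive_stage4_passes_py_spec : Claim_equal_has_two_consecutive_stage4_passes_py := by
  intro rows _
  unfold Spec_has_two_consecutive_stage4_passes_py
  exact has_two_consecutive_stage4_passes_py_spec' rows
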